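-- pv_equiv track=rewrite | github.com/shinwonse/coding-test | 프로그래머스/unrated/132267. 콜라 문제/콜라 문제.py | solution
-- ===== SOURCE A (Python) =====
-- def solution(a, b, n):
--     current_coke = n
--     result = 0
--
--     while current_coke >= a:
--         remained_coke = current_coke % a
--         current_coke = (current_coke // a) * b
--         result += current_coke
--         current_coke += remained_coke
--
--     return result
-- ===== SOURCE B (Python) =====
-- def solution(a, b, n):
--     # closed form: each exchange trades a empties for b fulls, net cost a-b bottles
--     return 0 if n < a else (n - b) // (a - b) * b
-- ===== Notes on version B (the rewrite author's own statement) =====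
-- stated objective: simpler
-- what changed: replaces the iterative exchange simulation with the one-line closed-form count (n-b)//(a-b)*b of full bottles received, guarded by n < a.
-- outside the precondition, e.g. on solution(-5, 3, 7): A returns -6, B returns -3; on solution(3, -2, 10): A returns -6, B returns -4
import Mathlib
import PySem

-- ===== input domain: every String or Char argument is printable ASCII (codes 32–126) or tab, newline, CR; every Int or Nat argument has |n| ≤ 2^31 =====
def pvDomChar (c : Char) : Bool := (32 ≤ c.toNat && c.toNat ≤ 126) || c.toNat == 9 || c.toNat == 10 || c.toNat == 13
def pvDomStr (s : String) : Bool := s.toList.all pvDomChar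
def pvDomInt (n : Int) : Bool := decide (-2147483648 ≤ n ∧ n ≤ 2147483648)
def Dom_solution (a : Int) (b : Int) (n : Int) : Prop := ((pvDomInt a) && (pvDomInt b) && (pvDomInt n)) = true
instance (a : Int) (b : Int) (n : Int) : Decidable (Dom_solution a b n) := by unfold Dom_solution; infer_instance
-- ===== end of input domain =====

-- B replaces A's exchange-simulation loop with the O(1) closed form (n-b)//(a-b)*b.

-- ===== PORT A =====
-- A's while loop, with fuel to make it total; inside Pre_ the fuel n.toNat + 1 is
-- enough (the loop variable strictly decreases, see loop_closed_form below).
def solutionLoop (a : Int) (b : Int) : Nat → Int → Int → Int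
  | 0, _, result => result
  | fuel + 1, current_coke, result =>
    if a ≤ current_coke then
      let remained_coke := PySem.Int.mod current_coke a
      let current_coke' := PySem.Int.floordiv current_coke a * b
      let result' := result + current_coke'
      solutionLoop a b fuel (current_coke' + remained_coke) result'
    else result

def solution (a : Int) (b : Int) (n : Int) : Int :=
  solutionLoop a b (n.toNat + 1) n 0

-- ===== PORT B =====
def solution_alt (a : Int) (b : Int) (n : Int) : Int :=
  if n < a then 0 else PySem.Int.floordiv (n - b) (a - b) * b

-- ===== PRECONDITION & SPEC =====
-- Pre_ keeps the problem's natural domain: a ≥ 1, and 0 ≤ b < a whenever an exchange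
-- happens (n ≥ a). Outside it A raises ZeroDivisionError (a = 0 with n ≥ 0), loops
-- forever (b ≥ a with n ≥ a), or returns a value from a meaningless simulation with a
-- negative bottle price or negative exchange rate.
def Pre_solution (a : Int) (b : Int) (n : Int) : Prop :=
  1 ≤ a ∧ (n < a ∨ (0 ≤ b ∧ b < a))
instance (a : Int) (b : Int) (n : Int) : Decidable (Pre_solution a b n) := by
  unfold Pre_solution; infer_instance

def pvWitness_solution : Int × Int × Int := (3, 1, 10)

def Spec_solution (a : Int) (b : Int) (n : Int) (out : Int) : Prop := out = solution_alt a b n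
instance (a : Int) (b : Int) (n : Int) (out : Int) : Decidable (Spec_solution a b n out) := by unfold Spec_solution; infer_instance

-- ===== CLAIM (what is proved, stated in full; the proofs are below) =====
def Claim_equal_solution : Prop := ∀ (a : Int) (b : Int) (n : Int), Dom_solution a b n → Pre_solution a b n → Spec_solution a b n (solution a b n)

-- ===== LEMMAS AND PROOFS =====

-- The loop starting at `c` (with enough fuel) adds exactly (c-b)//(a-b)*b when c ≥ a.
theorem loop_closed_form (a b : Int) (ha : 1 ≤ a) (hb0 : 0 ≤ b) (hba : b < a) :
    ∀ (f : Nat) (c res : Int), c.toNat < f →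
      solutionLoop a b f c res =
        res + (if a ≤ c then PySem.Int.floordiv (c - b) (a - b) * b else 0) := by
  intro f
  induction f with
  | zero => intro c res h; omega
  | succ f ih =>
    intro c res h
    by_cases hc : a ≤ c
    · have hapos : (0 : Int) < a := by omega
      have hqr : PySem.Int.floordiv c a * a + PySem.Int.mod c a = c :=
        PySem.Int.floordiv_mul_add_mod c a
      have hr0 : 0 ≤ PySem.Int.mod c a := PySem.Int.mod_nonneg c hapos
      have hra : PySem.Int.mod c a < a := PySem.Int.mod_lt c hapos
      set q := PySem.Int.floordiv c a with hqdef
      set r := PySem.Int.mod c a with hrdef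
      have hq1 : 1 ≤ q := by nlinarith [hqr, hra, hc, hapos]
      set c' := q * b + r with hc'def
      -- one step of the loop
      have hstep : solutionLoop a b (f + 1) c res =
          solutionLoop a b f c' (res + q * b) := by
        simp only [solutionLoop, if_pos hc]
        congr 1
      -- the loop variable strictly decreases and stays nonnegative
      have hmul : q * b < q * a := mul_lt_mul_of_pos_left hba (by omega)
      have hdec : c' < c := by omega
      have hqb0 : 0 ≤ q * b := mul_nonneg (by omega) hb0
      have hfuel : c'.toNat < f := by omega
      rw [hstep, ih c' (res + q * b) hfuel]
      -- the arithmetic identity on exchange counts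
      have hd : (0 : Int) < a - b := by omega
      have hexp : q * (a - b) = q * a - q * b := by ring
      have hsplit : c - b = (c' - b) + q * (a - b) := by omega
      have h1 : PySem.Int.floordiv (c - b) (a - b) =
          PySem.Int.floordiv (c' - b) (a - b) + q := by
        rw [PySem.Int.floordiv_eq_ediv_of_pos hd, PySem.Int.floordiv_eq_ediv_of_pos hd,
          hsplit, Int.add_mul_ediv_right _ _ (by omega : a - b ≠ 0)]
      have main : PySem.Int.floordiv (c - b) (a - b) =
          q + (if a ≤ c' then PySem.Int.floordiv (c' - b) (a - b) else 0) := by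
        by_cases hc2 : a ≤ c'
        · rw [if_pos hc2, h1]; ring
        · -- c' < a and b ≤ c' (q ≥ 1, r ≥ 0), so (c'-b)//(a-b) = 0
          have hbc' : b ≤ q * b := le_mul_of_one_le_left hb0 hq1
          have hz : PySem.Int.floordiv (c' - b) (a - b) = 0 := by
            rw [PySem.Int.floordiv_eq_ediv_of_pos hd]
            exact Int.ediv_eq_zero_of_lt (by omega) (by omega)
          rw [if_neg hc2, h1, hz]; ring
      rw [if_pos hc, main]
      split_ifs <;> ring
    · simp only [solutionLoop, if_neg hc, add_zero]

-- ===== VERDICT (by name: the statement is the Claim_ definition above) =====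
theorem solution_spec : Claim_equal_solution := by
  intro a b n _ hpre
  rcases hpre with ⟨ha, hrest⟩
  unfold Spec_solution solution solution_alt
  by_cases hn : n < a
  · -- loop body never runs
    simp only [solutionLoop, if_neg (by omega : ¬ a ≤ n), if_pos hn]
  · rcases hrest with h | ⟨hb0, hba⟩
    · omega
    · rw [loop_closed_form a b ha hb0 hba (n.toNat + 1) n 0 (by omega)]
      simp [hn]
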